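-- pv_equiv track=rewrite | github.com/cleytonap/code-challenges | Codility/Lesson_10/10_4_Peaks.py | solution
-- ===== SOURCE A (Python) =====
-- def checkPeaks(A, peaks, k): #constraints: len(peaks) >= 2. Peaks is sorted in ascending order.
--
--
--     if len(A) % k != 0:
--         return False
--
--     if k > len(peaks):
--         return False
--
--     i = 0
--     block_size = len(A) // k
--     while i < len(A):
--
--         for j in range(i, block_size + i):
--             if j in peaks:
--                 break
--         else: #did not hit break!
--             return False #did not find a peak in current block!
--
--         i = i + block_size
--
--     return True
--
-- def solution(A):
--     #Find peaks
--     N = len(A)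
--     peaks = set()
--     for i in range(1, N -1):
--         if (A[i-1] < A[i] > A[i+1]):
--             peaks.add(i)
--
--     nPeaks = len(peaks)
--
--     if nPeaks == 0 or nPeaks == 1: return nPeaks
--
--     for k in range(nPeaks, 0, -1):
--         if checkPeaks(A, peaks, k):
--             return k
--
--
--     return -1 #error
-- ===== SOURCE B (Python) =====
-- def solution(A):
--     N = len(A)
--     # prefix[j] = number of peak indices < j
--     prefix = [0]
--     for i in range(N):
--         if 0 < i < N - 1 and A[i - 1] < A[i] > A[i + 1]:
--             prefix.append(prefix[-1] + 1)
--         else: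
--             prefix.append(prefix[-1])
--     total = prefix[N]
--     if total == 0:
--         return 0
--     best = 1
--     for k in range(2, total + 1):
--         if N % k == 0:
--             bs = N // k
--             if all(prefix[b + bs] > prefix[b] for b in range(0, N, bs)):
--                 best = k
--     return best
-- ===== Notes on version B (the rewrite author's own statement) =====
-- stated objective: alternative
-- what changed: B replaces A's hash-set of peak indices, per-block linear membership scans and downward search over k by a prefix-sum array of peak counts (each block checked in O(1)) and a single upward scan over candidate divisors keeping the last feasible k.
import Mathlib
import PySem

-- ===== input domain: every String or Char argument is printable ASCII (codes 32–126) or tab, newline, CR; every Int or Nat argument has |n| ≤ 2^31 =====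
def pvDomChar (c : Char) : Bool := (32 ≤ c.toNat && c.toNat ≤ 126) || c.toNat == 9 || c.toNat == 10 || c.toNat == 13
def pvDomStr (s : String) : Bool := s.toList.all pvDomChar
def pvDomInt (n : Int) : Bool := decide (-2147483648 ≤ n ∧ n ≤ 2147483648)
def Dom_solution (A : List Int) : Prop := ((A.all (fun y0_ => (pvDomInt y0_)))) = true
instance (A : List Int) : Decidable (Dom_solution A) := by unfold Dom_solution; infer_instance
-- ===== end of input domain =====

-- B replaces A's peak set, per-block linear scans and downward search with a prefix-sum
-- array of peak counts and an upward scan over candidate block counts (objective: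
-- alternative; equivalence of return values is proved below).

-- ===== PORT A =====
-- all pyGetD indices below are in range at every call site reached from `solution`,
-- so the default 0 is never used (exact port)
def checkPeaks (A : List Int) (peaks : PySem.Set Int) (k : Int) : Bool :=
  if ¬ (PySem.Int.mod (A.length : Int) k = 0) then false
  else if k > PySem.Set.len peaks then false
  else
    let bs := PySem.Int.floordiv (A.length : Int) k
    -- `while i < len(A): … ; i += bs` visits exactly range(0, len(A), bs) (bs ≥ 1 at call sites);
    -- the inner for…break…else returns False iff no j in the block is in peaks
    (PySem.List.pyRange 0 (A.length : Int) bs).all (fun i =>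
      (PySem.List.pyRange i (bs + i) 1).any (fun j => PySem.Set.contains peaks j))

def solution (A : List Int) : Int :=
  let N : Int := (A.length : Int)
  let peaks : PySem.Set Int :=
    (PySem.List.pyRange 1 (N - 1) 1).foldl
      (fun s i =>
        if PySem.List.pyGetD A (i-1) 0 < PySem.List.pyGetD A i 0 ∧
           PySem.List.pyGetD A i 0 > PySem.List.pyGetD A (i+1) 0
        then PySem.Set.add s i else s)
      PySem.Set.empty
  let nPeaks : Int := PySem.Set.len peaks
  if nPeaks = 0 ∨ nPeaks = 1 then nPeaks
  else
    match (PySem.List.pyRange nPeaks 0 (-1)).find? (fun k => checkPeaks A peaks k) with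
    | some k => k
    | none => -1

-- ===== PORT B =====
def solution_alt (A : List Int) : Int :=
  let N : Int := (A.length : Int)
  let pre : List Int :=
    (PySem.List.pyRange 0 N 1).foldl
      (fun p i =>
        if 0 < i ∧ i < N - 1 ∧
           PySem.List.pyGetD A (i-1) 0 < PySem.List.pyGetD A i 0 ∧
           PySem.List.pyGetD A i 0 > PySem.List.pyGetD A (i+1) 0
        then p ++ [PySem.List.pyGetD p (-1) 0 + 1]
        else p ++ [PySem.List.pyGetD p (-1) 0])
      [0]
  let total : Int := PySem.List.pyGetD pre N 0
  if total = 0 then 0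
  else
    (PySem.List.pyRange 2 (total + 1) 1).foldl
      (fun best k =>
        if PySem.Int.mod N k = 0 then
          let bs := PySem.Int.floordiv N k
          if (PySem.List.pyRange 0 N bs).all
               (fun b => PySem.List.pyGetD pre b 0 < PySem.List.pyGetD pre (b + bs) 0)
          then k else best
        else best)
      1

-- ===== PRECONDITION & SPEC =====
def Spec_solution (A : List Int) (out : Int) : Prop := out = solution_alt A
instance (A : List Int) (out : Int) : Decidable (Spec_solution A out) := by unfold Spec_solution; infer_instance

-- ===== CLAIM (what is proved, stated in full; the proofs are below) =====
def Claim_equal_solution : Prop := ∀ (A : List Int), Dom_solution A → Spec_solution A (solution A)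

-- ===== LEMMAS AND PROOFS =====

-- Bool test "A[i-1] < A[i] > A[i+1]" (A's filter condition, no bounds)
def pvCmp (A : List Int) (i : Int) : Bool :=
  decide (PySem.List.pyGetD A (i-1) 0 < PySem.List.pyGetD A i 0 ∧
          PySem.List.pyGetD A i 0 > PySem.List.pyGetD A (i+1) 0)

-- B's peak test (with bounds)
def pvPeak (A : List Int) (i : Int) : Bool :=
  decide (0 < i) && decide (i < (A.length : Int) - 1) && pvCmp A i

-- number of peak indices below j
def pvCnt (A : List Int) (j : Int) : Int :=
  (((PySem.List.pyRange 0 j 1).filter (pvPeak A)).length : Int)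


-- peaks-building fold over a Nodup list is a filter (Set.add always appends)
theorem pv_foldl_set_add_if (p : Int → Bool) :
    ∀ (l : List Int) (s0 : List Int), l.Nodup → (∀ x ∈ l, x ∉ s0) →
      l.foldl (fun s i => if p i then PySem.Set.add s i else s) s0 = s0 ++ l.filter p := by
  intro l
  induction l with
  | nil => intro s0 _ _; simp
  | cons x l ih =>
    intro s0 hnd hdis
    simp only [List.foldl_cons]
    rcases List.nodup_cons.mp hnd with ⟨hx, hl⟩
    by_cases hp : p x
    · rw [if_pos hp, PySem.Set.add_of_not_mem (hdis x (by simp))]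
      rw [ih (s0 ++ [x]) hl (by
        intro y hy
        simp only [List.mem_append, List.mem_singleton]
        rintro (h | rfl)
        · exact hdis y (by simp [hy]) h
        · exact hx hy)]
      simp [hp]
    · rw [if_neg hp, ih s0 hl (fun y hy => hdis y (by simp [hy]))]
      simp [hp]

-- the port's peaks fold equals a filter
theorem pv_peaks_eq (A : List Int) :
    ((PySem.List.pyRange 1 ((A.length : Int) - 1) 1).foldl
      (fun s i =>
        if PySem.List.pyGetD A (i-1) 0 < PySem.List.pyGetD A i 0 ∧
           PySem.List.pyGetD A i 0 > PySem.List.pyGetD A (i+1) 0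
        then PySem.Set.add s i else s)
      PySem.Set.empty)
    = (PySem.List.pyRange 1 ((A.length : Int) - 1) 1).filter (pvCmp A) := by
  have h := PySem.List.foldl_congr_mem (PySem.List.pyRange 1 ((A.length : Int) - 1) 1)
      (fun s i =>
        if PySem.List.pyGetD A (i-1) 0 < PySem.List.pyGetD A i 0 ∧
           PySem.List.pyGetD A i 0 > PySem.List.pyGetD A (i+1) 0
        then PySem.Set.add s i else s)
      (fun s i => if pvCmp A i then PySem.Set.add s i else s)
      (PySem.Set.empty)
      (by intro acc x _; simp [pvCmp])
  rw [h]
  show List.foldl _ ([] : List Int) _ = _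
  rw [pv_foldl_set_add_if (pvCmp A) _ [] (PySem.List.nodup_pyRange_one _ _) (by simp)]
  simp

theorem pv_cnt_zero (A : List Int) : pvCnt A 0 = 0 := by
  simp [pvCnt, PySem.List.pyRange_one_eq_nil (by omega : (0:Int) ≤ 0)]

theorem pv_cnt_succ (A : List Int) (m : Int) (h : 0 ≤ m) :
    pvCnt A (m + 1) = pvCnt A m + (if pvPeak A m then 1 else 0) := by
  unfold pvCnt
  rw [PySem.List.pyRange_one_succ_right h, List.filter_append]
  cases hp : pvPeak A m <;> simp [hp]

-- the port's prefix fold builds the map of pvCnt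
theorem pv_prefix_eq (A : List Int) :
    ∀ (m : Nat), m ≤ A.length →
    ((PySem.List.pyRange 0 (m : Int) 1).foldl
      (fun p i =>
        if 0 < i ∧ i < (A.length : Int) - 1 ∧
           PySem.List.pyGetD A (i-1) 0 < PySem.List.pyGetD A i 0 ∧
           PySem.List.pyGetD A i 0 > PySem.List.pyGetD A (i+1) 0
        then p ++ [PySem.List.pyGetD p (-1) 0 + 1]
        else p ++ [PySem.List.pyGetD p (-1) 0])
      [0])
    = (PySem.List.pyRange 0 ((m : Int) + 1) 1).map (pvCnt A) := by
  intro m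
  induction m with
  | zero =>
    intro _
    simp only [Nat.cast_zero]
    rw [PySem.List.pyRange_one_eq_nil (by norm_num : (0:Int) ≤ 0)]
    have h1 : PySem.List.pyRange 0 (1 : Int) 1 = [0] := by
      have := PySem.List.pyRange_one_singleton (0 : Int)
      simpa using this
    norm_num
    rw [h1]
    simp [pv_cnt_zero]
  | succ m ih =>
    intro hm
    have hcast : ((m + 1 : Nat) : Int) = (m : Int) + 1 := by push_cast; ring
    rw [hcast, PySem.List.pyRange_one_succ_right (by positivity : (0:Int) ≤ (m:Int)),
        List.foldl_append, ih (by omega)]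
    rw [PySem.List.pyRange_one_succ_right (by positivity : (0:Int) ≤ (m:Int) + 1), List.map_append]
    simp only [List.foldl_cons, List.foldl_nil]
    have hlast : PySem.List.pyGetD ((PySem.List.pyRange 0 ((m:Int)+1) 1).map (pvCnt A)) (-1) 0
        = pvCnt A (m : Int) := by
      rw [PySem.List.pyRange_one_succ_right (by positivity : (0:Int) ≤ (m:Int)), List.map_append]
      exact PySem.List.pyGetD_neg_one_append_singleton _ _ _
    rw [hlast]
    have hcnt := pv_cnt_succ A (m : Int) (by positivity)
    by_cases hp : (0 < (m:Int) ∧ (m:Int) < (A.length : Int) - 1 ∧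
           PySem.List.pyGetD A ((m:Int)-1) 0 < PySem.List.pyGetD A (m:Int) 0 ∧
           PySem.List.pyGetD A (m:Int) 0 > PySem.List.pyGetD A ((m:Int)+1) 0)
    · have hpk : pvPeak A (m : Int) = true := by
        simp only [pvPeak, pvCmp, Bool.and_eq_true, decide_eq_true_eq]
        exact ⟨⟨hp.1, hp.2.1⟩, hp.2.2.1, hp.2.2.2⟩
      rw [if_pos hp, List.map_singleton, hcnt, hpk]
      simp
    · have hpk : pvPeak A (m : Int) = false := by
        by_contra hc
        have hc' : pvPeak A (m : Int) = true := by
          cases hpv : pvPeak A (m : Int) with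
          | false => exact absurd hpv hc
          | true => rfl
        simp only [pvPeak, pvCmp, Bool.and_eq_true, decide_eq_true_eq] at hc'
        exact hp ⟨hc'.1.1, hc'.1.2, hc'.2.1, hc'.2.2⟩
      rw [if_neg hp, List.map_singleton, hcnt, hpk]
      simp


-- counting pvPeak over [0, N) equals counting pvCmp over [1, N-1)
theorem pv_filter_shift (A : List Int) :
    (PySem.List.pyRange 0 (A.length : Int) 1).filter (pvPeak A)
      = (PySem.List.pyRange 1 ((A.length : Int) - 1) 1).filter (pvCmp A) := by
  set N : Int := (A.length : Int) with hN
  by_cases h2 : 2 ≤ N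
  · rw [PySem.List.pyRange_one_append 0 1 N (by omega) (by omega),
        PySem.List.pyRange_one_append 1 (N - 1) N (by omega) (by omega),
        List.filter_append, List.filter_append]
    have ha : (PySem.List.pyRange 0 1 1).filter (pvPeak A) = [] := by
      rw [List.filter_eq_nil_iff]
      intro j hj
      rw [PySem.List.mem_pyRange_one] at hj
      simp only [pvPeak, Bool.and_eq_true, decide_eq_true_eq, Bool.and_assoc]
      intro hc
      omega
    have hb : (PySem.List.pyRange (N - 1) N 1).filter (pvPeak A) = [] := by
      rw [List.filter_eq_nil_iff]
      intro j hj
      rw [PySem.List.mem_pyRange_one] at hj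
      simp only [pvPeak, Bool.and_eq_true, decide_eq_true_eq, Bool.and_assoc]
      intro hc
      omega
    have hc : (PySem.List.pyRange 1 (N - 1) 1).filter (pvPeak A)
        = (PySem.List.pyRange 1 (N - 1) 1).filter (pvCmp A) := by
      apply List.filter_congr
      intro j hj
      rw [PySem.List.mem_pyRange_one] at hj
      simp only [pvPeak]
      have d1 : decide (0 < j) = true := by simp; omega
      have d2 : decide (j < N - 1) = true := by simp; omega
      rw [d1, d2]
      simp
    rw [ha, hb, hc]
    simp
  · have ha : (PySem.List.pyRange 0 N 1).filter (pvPeak A) = [] := by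
      rw [List.filter_eq_nil_iff]
      intro j hj
      rw [PySem.List.mem_pyRange_one] at hj
      simp only [pvPeak, Bool.and_eq_true, decide_eq_true_eq, Bool.and_assoc]
      intro hc
      omega
    have hb : PySem.List.pyRange 1 (N - 1) 1 = [] :=
      PySem.List.pyRange_one_eq_nil (by omega)
    rw [ha, hb]
    rfl

-- membership of the peaks list is pvPeak
theorem pv_mem_peaks (A : List Int) (j : Int) :
    (j ∈ (PySem.List.pyRange 1 ((A.length : Int) - 1) 1).filter (pvCmp A)) ↔ pvPeak A j = true := by
  rw [List.mem_filter, PySem.List.mem_pyRange_one]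
  simp only [pvPeak, Bool.and_eq_true, decide_eq_true_eq]
  constructor
  · rintro ⟨⟨h1, h2⟩, h3⟩
    exact ⟨⟨by omega, h2⟩, h3⟩
  · rintro ⟨⟨h1, h2⟩, h3⟩
    exact ⟨⟨by omega, h2⟩, h3⟩

-- a block [b, b+bs) contains a peak iff the prefix count strictly grows
theorem pv_block (A : List Int) (b bs : Int) (hb : 0 ≤ b) (hbs : 0 < bs) :
    ((PySem.List.pyRange b (bs + b) 1).any
        (fun j => PySem.Set.contains ((PySem.List.pyRange 1 ((A.length : Int) - 1) 1).filter (pvCmp A)) j))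
      = decide (pvCnt A b < pvCnt A (b + bs)) := by
  have hsplit : pvCnt A (b + bs)
      = pvCnt A b + (((PySem.List.pyRange b (b + bs) 1).filter (pvPeak A)).length : Int) := by
    unfold pvCnt
    rw [PySem.List.pyRange_one_append 0 b (b + bs) hb (by omega), List.filter_append,
        List.length_append]
    push_cast
    ring
  have hco : ∀ j : Int, PySem.Set.contains
      ((PySem.List.pyRange 1 ((A.length : Int) - 1) 1).filter (pvCmp A)) j = pvPeak A j := by
    intro j
    cases hpv : pvPeak A j with
    | true =>
      have := (pv_mem_peaks A j).mpr hpv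
      simpa [PySem.Set.contains] using this
    | false =>
      have : j ∉ (PySem.List.pyRange 1 ((A.length : Int) - 1) 1).filter (pvCmp A) := by
        intro hmem
        rw [pv_mem_peaks A j] at hmem
        rw [hpv] at hmem
        exact Bool.false_ne_true hmem
      simpa [PySem.Set.contains] using this
  rcases Bool.eq_false_or_eq_true
      ((PySem.List.pyRange b (bs + b) 1).any
        (fun j => PySem.Set.contains ((PySem.List.pyRange 1 ((A.length : Int) - 1) 1).filter (pvCmp A)) j)) with hA | hA
  · rw [hA]
    rw [List.any_eq_true] at hA
    obtain ⟨j, hj, hcj⟩ := hA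
    rw [hco j] at hcj
    have hmem : j ∈ (PySem.List.pyRange b (b + bs) 1).filter (pvPeak A) := by
      rw [List.mem_filter]
      exact ⟨by rwa [show b + bs = bs + b by ring], hcj⟩
    have hpos : 0 < (((PySem.List.pyRange b (b + bs) 1).filter (pvPeak A)).length : Int) := by
      have := List.length_pos_of_mem hmem
      exact_mod_cast this
    symm
    simp only [decide_eq_true_eq]
    omega
  · rw [hA]
    rw [List.any_eq_false] at hA
    have hnil : (PySem.List.pyRange b (b + bs) 1).filter (pvPeak A) = [] := by
      rw [List.filter_eq_nil_iff]
      intro j hj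
      have := hA j (by rwa [show bs + b = b + bs by ring])
      rw [hco j] at this
      simp [this]
    rw [hnil] at hsplit
    simp at hsplit
    simp [hsplit]

-- descending first-hit search = ascending keep-the-last fold, given Q 1
theorem pv_findfold (Q : Int → Bool) (hQ1 : Q 1 = true) :
    ∀ (P : Nat), 1 ≤ P →
      (PySem.List.pyRange (P : Int) 0 (-1)).find? Q
      = some ((PySem.List.pyRange 2 ((P : Int) + 1) 1).foldl (fun best k => if Q k then k else best) 1) := by
  intro P
  induction P with
  | zero => intro h; omega
  | succ m ih =>
    intro _
    by_cases hm : 1 ≤ m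
    · have hcast : ((m + 1 : Nat) : Int) = (m : Int) + 1 := by push_cast; ring
      rw [hcast, PySem.List.pyRange_neg_one_cons (by positivity : (0:Int) < (m:Int) + 1)]
      rw [show (m : Int) + 1 - 1 = (m : Int) by ring]
      rw [PySem.List.pyRange_one_succ_right (by omega : (2:Int) ≤ (m:Int) + 1), List.foldl_append]
      simp only [List.foldl_cons, List.foldl_nil, List.find?_cons]
      cases hq : Q ((m : Int) + 1) with
      | true => simp
      | false => simpa [hq] using ih hm
    · have hm0 : m = 0 := by omega
      subst hm0
      norm_num
      have h1 : PySem.List.pyRange (1 : Int) 0 (-1) = [1] := by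
        rw [PySem.List.pyRange_neg_one_cons (by norm_num : (0:Int) < 1)]
        have : PySem.List.pyRange (1 - 1 : Int) 0 (-1) = [] :=
          PySem.List.pyRange_neg_one_eq_nil (by norm_num)
        rw [this]
      rw [h1]
      simp [List.find?, hQ1]


theorem pv_contains (A : List Int) (j : Int) :
    PySem.Set.contains ((PySem.List.pyRange 1 ((A.length : Int) - 1) 1).filter (pvCmp A)) j
      = pvPeak A j := by
  cases hpv : pvPeak A j with
  | true =>
    have := (pv_mem_peaks A j).mpr hpv
    simpa [PySem.Set.contains] using this
  | false =>
    have : j ∉ (PySem.List.pyRange 1 ((A.length : Int) - 1) 1).filter (pvCmp A) := by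
      intro hmem
      rw [pv_mem_peaks A j] at hmem
      rw [hpv] at hmem
      exact Bool.false_ne_true hmem
    simpa [PySem.Set.contains] using this

theorem pv_cnt_nonneg (A : List Int) (j : Int) : 0 ≤ pvCnt A j := by
  unfold pvCnt; positivity

theorem pv_cnt_le (A : List Int) (j : Int) (h : 0 ≤ j) : pvCnt A j ≤ j := by
  unfold pvCnt
  have h1 : ((PySem.List.pyRange 0 j 1).filter (pvPeak A)).length
      ≤ (PySem.List.pyRange 0 j 1).length := List.length_filter_le _ _
  have h2 : (PySem.List.pyRange 0 j 1).length = (j - 0).toNat := PySem.List.length_pyRange_one 0 j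
  omega

theorem pv_N_big (A : List Int) (h : 1 ≤ pvCnt A (A.length : Int)) : 3 ≤ (A.length : Int) := by
  unfold pvCnt at h
  rw [pv_filter_shift A] at h
  rcases hl : (PySem.List.pyRange 1 ((A.length : Int) - 1) 1).filter (pvCmp A) with _ | ⟨j, l⟩
  · rw [hl] at h; simp at h
  · have hj : j ∈ (PySem.List.pyRange 1 ((A.length : Int) - 1) 1).filter (pvCmp A) := by
      rw [hl]; simp
    rw [List.mem_filter, PySem.List.mem_pyRange_one] at hj
    omega

theorem pv_len_peaks (A : List Int) :
    PySem.Set.len ((PySem.List.pyRange 1 ((A.length : Int) - 1) 1).filter (pvCmp A))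
      = pvCnt A (A.length : Int) := by
  unfold pvCnt
  rw [pv_filter_shift A]
  simp [PySem.Set.len]

theorem pv_Q1 (A : List Int) (h : 1 ≤ pvCnt A (A.length : Int)) :
    checkPeaks A ((PySem.List.pyRange 1 ((A.length : Int) - 1) 1).filter (pvCmp A)) 1 = true := by
  have hN3 : 3 ≤ (A.length : Int) := pv_N_big A h
  unfold checkPeaks
  rw [if_neg (not_not_intro ((PySem.Int.mod_eq_zero_iff_dvd ((A.length : Int)) 1).mpr (one_dvd _)))]
  rw [if_neg (by rw [pv_len_peaks A]; omega)]
  have hbs : PySem.Int.floordiv ((A.length : Int)) 1 = (A.length : Int) := by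
    rw [PySem.Int.floordiv_eq_ediv_of_pos (by norm_num)]
    exact Int.ediv_one _
  rw [hbs]
  rw [List.all_eq_true]
  intro i hi
  rw [PySem.List.mem_pyRange_iff_of_pos (by omega) i] at hi
  obtain ⟨hi0, hiN, t, ht⟩ := hi
  have hi00 : i = 0 := by
    rw [show i - 0 = i by ring] at ht
    subst ht
    rcases lt_trichotomy t 0 with h' | h' | h'
    · nlinarith
    · simp [h']
    · nlinarith
  subst hi00
  -- find a peak index
  have hex : ∃ j, pvPeak A j = true ∧ 1 ≤ j ∧ j < (A.length : Int) - 1 := by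
    have h' := h
    unfold pvCnt at h'
    rw [pv_filter_shift A] at h'
    rcases hl : (PySem.List.pyRange 1 ((A.length : Int) - 1) 1).filter (pvCmp A) with _ | ⟨j, l⟩
    · rw [hl] at h'; simp at h'
    · have hj : j ∈ (PySem.List.pyRange 1 ((A.length : Int) - 1) 1).filter (pvCmp A) := by
        rw [hl]; simp
      have hjp := (pv_mem_peaks A j).mp hj
      rw [List.mem_filter, PySem.List.mem_pyRange_one] at hj
      exact ⟨j, hjp, hj.1.1, hj.1.2⟩
  obtain ⟨j, hjp, hj1, hj2⟩ := hex
  rw [List.any_eq_true]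
  refine ⟨j, ?_, ?_⟩
  · rw [PySem.List.mem_pyRange_one]
    omega
  · rw [pv_contains A j, hjp]

theorem pv_body_eq (A : List Int) (k best : Int) (h2 : 2 ≤ k)
    (hkP : k ≤ pvCnt A (A.length : Int)) :
    (if PySem.Int.mod ((A.length : Int)) k = 0 then
      (if (PySem.List.pyRange 0 ((A.length : Int)) (PySem.Int.floordiv ((A.length : Int)) k)).all
            (fun b =>
              PySem.List.pyGetD ((PySem.List.pyRange 0 ((A.length : Int) + 1) 1).map (pvCnt A)) b 0 <
              PySem.List.pyGetD ((PySem.List.pyRange 0 ((A.length : Int) + 1) 1).map (pvCnt A))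
                (b + PySem.Int.floordiv ((A.length : Int)) k) 0)
      then k else best)
    else best)
    = (if checkPeaks A ((PySem.List.pyRange 1 ((A.length : Int) - 1) 1).filter (pvCmp A)) k
       then k else best) := by
  by_cases hm : PySem.Int.mod ((A.length : Int)) k = 0
  · have hdvd : k ∣ ((A.length : Int)) := (PySem.Int.mod_eq_zero_iff_dvd ((A.length : Int)) k).mp hm
    have hN3 : 3 ≤ ((A.length : Int)) := pv_N_big A (by omega)
    have hkN : k ≤ ((A.length : Int)) := le_trans hkP (pv_cnt_le A ((A.length : Int)) (by omega))
    have hk0 : (0:Int) < k := by omega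
    have hbs : PySem.Int.floordiv ((A.length : Int)) k = ((A.length : Int)) / k :=
      PySem.Int.floordiv_eq_ediv_of_pos hk0
    have hbspos : 0 < ((A.length : Int)) / k := by
      have h1 : (1:Int) ≤ ((A.length : Int)) / k := Int.le_ediv_iff_mul_le hk0 |>.mpr (by omega)
      omega
    have hbsk : ((A.length : Int)) / k * k = ((A.length : Int)) := Int.ediv_mul_cancel hdvd
    unfold checkPeaks
    rw [if_neg (not_not_intro hm)]
    rw [if_neg (show ¬ k > PySem.Set.len ((PySem.List.pyRange 1 ((A.length : Int) - 1) 1).filter (pvCmp A)) by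
      rw [pv_len_peaks A]; omega)]
    rw [if_pos hm]
    have hall : (PySem.List.pyRange 0 ((A.length : Int)) (PySem.Int.floordiv ((A.length : Int)) k)).all
            (fun b =>
              PySem.List.pyGetD ((PySem.List.pyRange 0 ((A.length : Int) + 1) 1).map (pvCnt A)) b 0 <
              PySem.List.pyGetD ((PySem.List.pyRange 0 ((A.length : Int) + 1) 1).map (pvCnt A))
                (b + PySem.Int.floordiv ((A.length : Int)) k) 0)
        = (PySem.List.pyRange 0 ((A.length : Int)) (PySem.Int.floordiv ((A.length : Int)) k)).all
            (fun i => (PySem.List.pyRange i (PySem.Int.floordiv ((A.length : Int)) k + i) 1).any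
              (fun j => PySem.Set.contains
                ((PySem.List.pyRange 1 ((A.length : Int) - 1) 1).filter (pvCmp A)) j)) := by
      have hpt : ∀ b ∈ PySem.List.pyRange 0 ((A.length : Int)) (PySem.Int.floordiv ((A.length : Int)) k),
          (decide (PySem.List.pyGetD ((PySem.List.pyRange 0 ((A.length : Int) + 1) 1).map (pvCnt A)) b 0 <
              PySem.List.pyGetD ((PySem.List.pyRange 0 ((A.length : Int) + 1) 1).map (pvCnt A))
                (b + PySem.Int.floordiv ((A.length : Int)) k) 0))
          = (PySem.List.pyRange b (PySem.Int.floordiv ((A.length : Int)) k + b) 1).any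
              (fun j => PySem.Set.contains
                ((PySem.List.pyRange 1 ((A.length : Int) - 1) 1).filter (pvCmp A)) j) := by
        intro b hb
        rw [hbs] at hb
        rw [PySem.List.mem_pyRange_iff_of_pos hbspos b] at hb
        obtain ⟨hb0, hbN, t, ht⟩ := hb
        have hbbs : b + ((A.length : Int)) / k ≤ ((A.length : Int)) := by
          rw [show b - 0 = b by ring] at ht
          have htk : t < k := by
            by_contra hc
            rw [not_lt] at hc
            have : ((A.length : Int)) / k * k ≤ ((A.length : Int)) / k * t :=
              mul_le_mul_of_nonneg_left hc (le_of_lt hbspos)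
            omega
          have : ((A.length : Int)) / k * (t + 1) ≤ ((A.length : Int)) / k * k :=
            mul_le_mul_of_nonneg_left (by omega) (le_of_lt hbspos)
          nlinarith
        rw [hbs]
        rw [PySem.List.pyGetD_map_pyRange_of_nonneg (pvCnt A) ((A.length : Int)+1) b 0 hb0 (by omega)]
        rw [PySem.List.pyGetD_map_pyRange_of_nonneg (pvCnt A) ((A.length : Int)+1)
            (b + ((A.length : Int)) / k) 0 (by omega) (by omega)]
        rw [pv_block A b (((A.length : Int)) / k) hb0 hbspos]
      rw [Bool.eq_iff_iff, List.all_eq_true, List.all_eq_true]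
      constructor
      · intro hh b hb
        rw [← hpt b hb]
        simp only [decide_eq_true_eq]
        have := hh b hb
        simpa using this
      · intro hh b hb
        have := hh b hb
        rw [← hpt b hb] at this
        simpa using this
    simp only [hall]
  · rw [if_neg hm]
    unfold checkPeaks
    rw [if_pos hm]
    simp

-- main equivalence
theorem pv_main (A : List Int) : solution A = solution_alt A := by
  simp only [solution, solution_alt]
  rw [pv_peaks_eq A]
  rw [pv_prefix_eq A A.length le_rfl]
  rw [PySem.List.pyGetD_map_pyRange_of_nonneg (pvCnt A) ((A.length : Int)+1) (A.length : Int) 0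
      (by positivity) (by omega)]
  rw [pv_len_peaks A]
  by_cases hc0 : pvCnt A (A.length : Int) = 0
  · rw [hc0]; simp
  · have hcpos : 1 ≤ pvCnt A (A.length : Int) := by
      have := pv_cnt_nonneg A (A.length : Int); omega
    by_cases hc1 : pvCnt A (A.length : Int) = 1
    · rw [hc1]
      have hr : PySem.List.pyRange 2 (1 + 1 : Int) 1 = [] :=
        PySem.List.pyRange_one_eq_nil (by norm_num)
      rw [hr]
      simp
    · have hc2 : 2 ≤ pvCnt A (A.length : Int) := by omega
      rw [if_neg (by rw [not_or]; exact ⟨hc0, hc1⟩), if_neg hc0]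
      have hfold := PySem.List.foldl_congr_mem
        (PySem.List.pyRange 2 (pvCnt A (A.length : Int) + 1) 1)
        (fun best k =>
          if PySem.Int.mod ((A.length : Int)) k = 0 then
            (if (PySem.List.pyRange 0 ((A.length : Int)) (PySem.Int.floordiv ((A.length : Int)) k)).all
                  (fun b =>
                    PySem.List.pyGetD ((PySem.List.pyRange 0 ((A.length : Int) + 1) 1).map (pvCnt A)) b 0 <
                    PySem.List.pyGetD ((PySem.List.pyRange 0 ((A.length : Int) + 1) 1).map (pvCnt A))
                      (b + PySem.Int.floordiv ((A.length : Int)) k) 0)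
            then k else best)
          else best)
        (fun best k =>
          if checkPeaks A ((PySem.List.pyRange 1 ((A.length : Int) - 1) 1).filter (pvCmp A)) k
          then k else best)
        1
        (by
          intro acc x hx
          rw [PySem.List.mem_pyRange_one] at hx
          exact pv_body_eq A x acc hx.1 (by omega))
      rw [hfold]
      -- now use pv_findfold with P the Nat length
      have hP : pvCnt A (A.length : Int)
          = (((PySem.List.pyRange 0 ((A.length : Int)) 1).filter (pvPeak A)).length : Int) := rfl
      have hP1 : 1 ≤ ((PySem.List.pyRange 0 ((A.length : Int)) 1).filter (pvPeak A)).length := by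
        omega
      rw [hP]
      rw [pv_findfold
        (fun k => checkPeaks A ((PySem.List.pyRange 1 ((A.length : Int) - 1) 1).filter (pvCmp A)) k)
        (pv_Q1 A hcpos)
        (((PySem.List.pyRange 0 ((A.length : Int)) 1).filter (pvPeak A)).length) hP1]

theorem solution_spec : Claim_equal_solution := by
  intro A _
  show solution A = solution_alt A
  exact pv_main A
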